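-- pv_equiv track=rewrite | github.com/JopVerbeek/AOC_2024 | day_12/d12.py | calc_perimeter
-- ===== SOURCE A (Python) =====
-- from collections import deque
--
-- def calc_perimeter(points):
--     perim_counter = 0
--     perimeter_dict = {}
--     dirs = [(-1, 0), (0, 1), (1, 0), (0, -1)]
--     for r, c in points:
--         perim_counter += 4
--         for dr, dc in dirs:
--             rr = r + dr
--             cc = c + dc
--             if (rr, cc) in points:
--                 perim_counter -= 1
--             else:
--                 if (dr, dc) not in perimeter_dict:
--                     perimeter_dict[(dr, dc)] = set()
--                 perimeter_dict[(dr, dc)].add((r, c))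
--
--
--
--     # calculate the number of sides in the polygon
--     # check for every up and down left right how far you can expand
--     # add expanded coors to the seen
--     side_counter = 0
--     for dir, perim_coor in perimeter_dict.items():
--         seen_sides = set()
--         for (pr, pc) in perim_coor:
--             if (pr, pc) not in seen_sides:
--                 side_counter += 1
--                 Q = deque([(pr, pc)])
--                 while Q:
--                     rr, cc = Q.popleft()
--                     if (rr, cc) in seen_sides:
--                         continue
--                     seen_sides.add((rr, cc))
--                     for dr, dc in dirs:
--                         r_r, c_c = rr + dr, cc + dc
--                         if (r_r, c_c) in perim_coor:
--                             Q.append((r_r, c_c))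
--
--     return perim_counter , side_counter
-- ===== SOURCE B (Python) =====
-- def calc_perimeter(points):
--     pts = set(points)
--     dirs = [(-1, 0), (0, 1), (1, 0), (0, -1)]
--     perim_counter = 4 * len(points) - sum(
--         1 for r, c in points for dr, dc in dirs if (r + dr, c + dc) in pts)
--     # a straight side is counted once, at its unique end cell in the
--     # perpendicular direction p paired with the boundary direction d
--     corners = [((-1, 0), (0, -1)), ((0, 1), (-1, 0)), ((1, 0), (0, 1)), ((0, -1), (1, 0))]
--     side_counter = 0
--     for r, c in pts:
--         for (dr, dc), (pr, pc) in corners: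
--             if (r + dr, c + dc) not in pts and (
--                     (r + pr, c + pc) not in pts or (r + dr + pr, c + dc + pc) in pts):
--                 side_counter += 1
--     return perim_counter, side_counter
-- ===== Notes on version B (the rewrite author's own statement) =====
-- stated objective: simpler
-- what changed: Replaces A's per-direction BFS flood-fill over boundary-cell sets (deque + seen set) for counting sides with a direct one-pass count of side-end cells (corner counting) over a set, and computes the perimeter as 4*len(points) minus the number of adjacent ordered pairs via set membership.
import Mathlib
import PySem

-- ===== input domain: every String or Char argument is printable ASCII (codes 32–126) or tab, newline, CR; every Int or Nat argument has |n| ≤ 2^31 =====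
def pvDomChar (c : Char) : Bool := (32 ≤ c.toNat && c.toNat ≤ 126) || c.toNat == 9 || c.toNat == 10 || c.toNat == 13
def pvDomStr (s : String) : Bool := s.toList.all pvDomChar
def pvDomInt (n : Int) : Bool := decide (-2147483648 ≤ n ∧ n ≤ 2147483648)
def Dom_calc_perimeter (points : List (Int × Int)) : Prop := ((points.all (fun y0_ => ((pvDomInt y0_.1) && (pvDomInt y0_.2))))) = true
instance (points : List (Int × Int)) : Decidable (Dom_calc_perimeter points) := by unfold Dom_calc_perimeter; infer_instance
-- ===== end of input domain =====

-- B replaces A's per-direction BFS flood-fill side counting by a direct count of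
-- side-end cells (corner counting) over a set, and computes the perimeter from
-- 4*len(points) minus the number of adjacent ordered pairs (objective: simpler).

-- helper used by pvBFS's termination proof
theorem pv_countP_lt {α : Type} (l : List α) (p q : α → Bool)
    (hmono : ∀ b, q b = true → p b = true) (a : α) (ha : a ∈ l)
    (hpa : p a = true) (hqa : q a = false) : l.countP q < l.countP p := by
  induction l with
  | nil => cases ha
  | cons b t ih =>
    rcases List.mem_cons.1 ha with rfl | hat
    · have := List.countP_mono_left (p := q) (q := p) (l := t) (fun x _ h => hmono x h)
      simp [hpa, hqa]; omega
    · have := ih hat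
      by_cases hqb : q b = true
      · simp [hqb, hmono b hqb]; omega
      · simp at hqb
        simp [hqb]
        by_cases hpb : p b = true <;> simp [hpb] <;> omega

-- ===== PORT A =====
def pvDirs : List (Int × Int) := [(-1, 0), (0, 1), (1, 0), (0, -1)]

-- one step of the inner `for dr, dc in dirs` loop of A's first phase
def pvUpd (points : List (Int × Int)) (cell : Int × Int)
    (st : Int × PySem.Dict (Int × Int) (PySem.Set (Int × Int))) (d : Int × Int) :
    Int × PySem.Dict (Int × Int) (PySem.Set (Int × Int)) :=
  let rr := cell.1 + d.1
  let cc := cell.2 + d.2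
  if (rr, cc) ∈ points then (st.1 - 1, st.2)
  else
    let dict := if st.2.contains d then st.2 else st.2.insert d PySem.Set.empty
    (st.1, dict.modify d PySem.Set.empty (fun s => PySem.Set.add s cell))

-- the `while Q:` BFS loop (hQ is only the totality argument, it does not alter the computation)
def pvBFS (S : PySem.Set (Int × Int)) (Q : List (Int × Int)) (seen : PySem.Set (Int × Int))
    (hQ : ∀ x ∈ Q, x ∈ S) : PySem.Set (Int × Int) :=
  match Q with
  | [] => seen
  | x :: rest =>
    if hx : x ∈ seen then
      pvBFS S rest seen (fun y hy => hQ y (List.mem_cons_of_mem x hy))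
    else
      pvBFS S
        (rest ++ pvDirs.filterMap (fun d =>
          if (x.1 + d.1, x.2 + d.2) ∈ S then some (x.1 + d.1, x.2 + d.2) else none))
        (PySem.Set.add seen x)
        (fun y hy => by
          rcases List.mem_append.1 hy with h | h
          · exact hQ y (List.mem_cons_of_mem x h)
          · rcases List.mem_filterMap.1 h with ⟨d, _, hd⟩
            split at hd
            · cases hd; assumption
            · cases hd)
termination_by 5 * (S.countP (fun y => !(PySem.Set.contains seen y))) + Q.length
decreasing_by
  · simp only [List.length_cons]; omega
  · have hlt : S.countP (fun y => !(PySem.Set.contains (PySem.Set.add seen x) y))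
        < S.countP (fun y => !(PySem.Set.contains seen y)) := by
      refine pv_countP_lt _ _ _ ?hmono x (hQ x List.mem_cons_self) ?hpa ?hqa
      case hmono =>
        intro b hb
        simp only [Bool.not_eq_true', PySem.Set.contains_eq_listContains] at hb ⊢
        simp only [← Bool.not_eq_true, List.contains_iff_mem] at hb ⊢
        intro hmem; exact hb ((PySem.Set.mem_add seen x b).2 (Or.inl hmem))
      case hpa =>
        simp only [Bool.not_eq_true', PySem.Set.contains_eq_listContains]
        simpa only [← Bool.not_eq_true, List.contains_iff_mem] using hx
      case hqa =>
        simp only [PySem.Set.contains_eq_listContains]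
        simp only [← Bool.not_eq_true]
        simp [PySem.Set.mem_add]
    have hlen : (pvDirs.filterMap (fun d =>
        if _h : (x.1 + d.1, x.2 + d.2) ∈ S then some (x.1 + d.1, x.2 + d.2) else none)).length
        ≤ pvDirs.length := List.length_filterMap_le _ _
    have h4 : pvDirs.length = 4 := rfl
    simp only [List.length_append, List.length_cons]
    omega

-- the body of A's `for dir, perim_coor in perimeter_dict.items()` loop
def pvInner (S : PySem.Set (Int × Int)) (acc : Int) : Int :=
  (S.attach.foldl (fun (st : Int × PySem.Set (Int × Int)) x =>
      if x.1 ∈ st.2 then st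
      else (st.1 + 1, pvBFS S [x.1] st.2 (fun y hy => (List.mem_singleton.1 hy) ▸ x.2)))
    (acc, PySem.Set.empty)).1

def calc_perimeter (points : List (Int × Int)) : Int × Int :=
  let st := points.foldl
    (fun st cell => pvDirs.foldl (pvUpd points cell) (st.1 + 4, st.2))
    ((0 : Int), PySem.Dict.empty)
  let side := st.2.items.foldl (fun acc kv => pvInner kv.2 acc) (0 : Int)
  (st.1, side)

-- ===== PORT B =====
def pvCorners : List ((Int × Int) × (Int × Int)) :=
  [((-1, 0), (0, -1)), ((0, 1), (-1, 0)), ((1, 0), (0, 1)), ((0, -1), (1, 0))]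

def calc_perimeter_alt (points : List (Int × Int)) : Int × Int :=
  let pts : PySem.Set (Int × Int) := PySem.Set.ofList points
  let adj : Int := points.foldl (fun acc rc =>
      pvDirs.foldl (fun acc d =>
        if (rc.1 + d.1, rc.2 + d.2) ∈ pts then acc + 1 else acc) acc) 0
  let perim : Int := 4 * points.length - adj
  let sides : Int := pts.foldl (fun acc rc =>
      pvCorners.foldl (fun acc c =>
        if (rc.1 + c.1.1, rc.2 + c.1.2) ∉ pts ∧
            ((rc.1 + c.2.1, rc.2 + c.2.2) ∉ pts ∨
             (rc.1 + c.1.1 + c.2.1, rc.2 + c.1.2 + c.2.2) ∈ pts)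
        then acc + 1 else acc) acc) 0
  (perim, sides)

-- ===== PRECONDITION & SPEC =====
def Spec_calc_perimeter (points : List (Int × Int)) (out : Int × Int) : Prop := out = calc_perimeter_alt points
instance (points : List (Int × Int)) (out : Int × Int) : Decidable (Spec_calc_perimeter points out) := by unfold Spec_calc_perimeter; infer_instance

-- ===== CLAIM (what is proved, stated in full; the proofs are below) =====
def Claim_equal_calc_perimeter : Prop := ∀ (points : List (Int × Int)), Dom_calc_perimeter points → Spec_calc_perimeter points (calc_perimeter points)

-- ===== LEMMAS AND PROOFS =====

def pvAdd (a b : Int × Int) : Int × Int := (a.1 + b.1, a.2 + b.2)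
def pvNeg (a : Int × Int) : Int × Int := (-a.1, -a.2)
def pvSmul (k : Int) (a : Int × Int) : Int × Int := (k * a.1, k * a.2)
def pvPerp (k : Int × Int) : Int × Int := (-k.2, k.1)

-- one ±p step inside S
def pvStep (S : PySem.Set (Int × Int)) (p : Int × Int) (a b : Int × Int) : Prop :=
  a ∈ S ∧ b ∈ S ∧ (b = pvAdd a p ∨ b = pvAdd a (pvNeg p))

def pvReach (S : PySem.Set (Int × Int)) (p : Int × Int) : (Int × Int) → (Int × Int) → Prop :=
  Relation.ReflTransGen (pvStep S p)

-- one BFS step avoiding `seen`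
def pvStepAv (S seen : PySem.Set (Int × Int)) (a b : Int × Int) : Prop :=
  a ∉ seen ∧ a ∈ S ∧ b ∈ S ∧ ∃ d ∈ pvDirs, b = pvAdd a d

def pvRA (S seen : PySem.Set (Int × Int)) : (Int × Int) → (Int × Int) → Prop :=
  Relation.ReflTransGen (pvStepAv S seen)

theorem pv_mem_nbrs (S : PySem.Set (Int × Int)) (x w : Int × Int) :
    w ∈ pvDirs.filterMap (fun d =>
        if (x.1 + d.1, x.2 + d.2) ∈ S then some (x.1 + d.1, x.2 + d.2) else none) ↔
      (w ∈ S ∧ ∃ d ∈ pvDirs, w = pvAdd x d) := by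
  constructor
  · intro h
    rcases List.mem_filterMap.1 h with ⟨d, hd, heq⟩
    by_cases hin : (x.1 + d.1, x.2 + d.2) ∈ S
    · rw [if_pos hin] at heq; cases heq; exact ⟨hin, d, hd, rfl⟩
    · rw [if_neg hin] at heq; cases heq
  · rintro ⟨hwS, d, hd, rfl⟩
    exact List.mem_filterMap.2 ⟨d, hd, if_pos hwS⟩

theorem pvRA_mono (S seen : PySem.Set (Int × Int)) (x z y : Int × Int)
    (h : pvRA S (PySem.Set.add seen x) z y) : pvRA S seen z y := by
  refine Relation.ReflTransGen.mono ?_ h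
  rintro a b ⟨h1, h2, h3, h4⟩
  exact ⟨fun ha => h1 ((PySem.Set.mem_add seen x a).2 (Or.inl ha)), h2, h3, h4⟩

theorem pvRA_of_seen (S seen : PySem.Set (Int × Int)) (x y : Int × Int)
    (hx : x ∈ seen) (h : pvRA S seen x y) : y = x := by
  rcases Relation.ReflTransGen.cases_head h with rfl | ⟨c, hstep, _⟩
  · rfl
  · exact absurd hx hstep.1

theorem pvRA_split (S seen : PySem.Set (Int × Int)) (x : Int × Int)
    (z y : Int × Int) (h : pvRA S seen z y) :
    (z = x → (y ∈ PySem.Set.add seen x ∨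
      ∃ w, (w ∈ S ∧ ∃ d ∈ pvDirs, w = pvAdd x d) ∧ pvRA S (PySem.Set.add seen x) w y)) ∧
    (z ≠ x → (pvRA S (PySem.Set.add seen x) z y ∨ y ∈ PySem.Set.add seen x ∨
      ∃ w, (w ∈ S ∧ ∃ d ∈ pvDirs, w = pvAdd x d) ∧ pvRA S (PySem.Set.add seen x) w y)) := by
  induction h using Relation.ReflTransGen.head_induction_on with
  | refl =>
    constructor
    · intro h; exact Or.inl ((PySem.Set.mem_add seen x y).2 (Or.inr h))
    · intro _; exact Or.inl Relation.ReflTransGen.refl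
  | @head a c hstep htail ih =>
    obtain ⟨haseen, haS, hcS, d', hd', hcd⟩ := hstep
    constructor
    · rintro rfl
      have hwchar : c ∈ S ∧ ∃ d ∈ pvDirs, c = pvAdd a d := ⟨hcS, d', hd', hcd⟩
      by_cases hcx : c = a
      · rcases ih.1 hcx with hy | hw
        · exact Or.inl hy
        · exact Or.inr hw
      · rcases ih.2 hcx with hra | hy | hw
        · exact Or.inr ⟨c, hwchar, hra⟩
        · exact Or.inl hy
        · exact Or.inr hw
    · intro hax
      have ha' : a ∉ PySem.Set.add seen x := by
        rw [PySem.Set.mem_add]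
        rintro (h | h)
        · exact haseen h
        · exact hax h
      by_cases hcx : c = x
      · rcases ih.1 hcx with hy | hw
        · exact Or.inr (Or.inl hy)
        · exact Or.inr (Or.inr hw)
      · rcases ih.2 hcx with hra | hy | hw
        · exact Or.inl (Relation.ReflTransGen.head ⟨ha', haS, hcS, d', hd', hcd⟩ hra)
        · exact Or.inr (Or.inl hy)
        · exact Or.inr (Or.inr hw)

theorem pvBFS_mem (S : PySem.Set (Int × Int)) (Q : List (Int × Int))
    (seen : PySem.Set (Int × Int)) (hQ : ∀ x ∈ Q, x ∈ S) (y : Int × Int) :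
    y ∈ pvBFS S Q seen hQ ↔ y ∈ seen ∨ ∃ x ∈ Q, pvRA S seen x y := by
  induction Q, seen, hQ using pvBFS.induct with
  | case1 seen hQ _ =>
    simp [pvBFS]
  | case2 seen x rest hQ hx _ ih =>
    rw [pvBFS]
    simp only [dif_pos hx]
    rw [ih]
    constructor
    · rintro (hy | ⟨z, hz, hra⟩)
      · exact Or.inl hy
      · exact Or.inr ⟨z, List.mem_cons_of_mem x hz, hra⟩
    · rintro (hy | ⟨z, hz, hra⟩)
      · exact Or.inl hy
      · rcases List.mem_cons.1 hz with rfl | hz'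
        · exact Or.inl ((pvRA_of_seen S seen z y hx hra) ▸ hx)
        · exact Or.inr ⟨z, hz', hra⟩
  | case3 seen x rest hQ hx _ ih =>
    rw [pvBFS]
    simp only [dif_neg hx]
    simp only [dite_eq_ite] at ih
    rw [ih]
    have hxS : x ∈ S := hQ x List.mem_cons_self
    constructor
    · rintro (hy | ⟨z, hz, hra⟩)
      · rcases (PySem.Set.mem_add seen x y).1 hy with hy' | rfl
        · exact Or.inl hy'
        · exact Or.inr ⟨y, List.mem_cons_self, Relation.ReflTransGen.refl⟩
      · rcases List.mem_append.1 hz with hz' | hz'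
        · exact Or.inr ⟨z, List.mem_cons_of_mem x hz', pvRA_mono S seen x z y hra⟩
        · obtain ⟨hzS, d', hd', rfl⟩ := (pv_mem_nbrs S x z).1 hz'
          exact Or.inr ⟨x, List.mem_cons_self,
            Relation.ReflTransGen.head ⟨hx, hxS, hzS, d', hd', rfl⟩
              (pvRA_mono S seen x _ y hra)⟩
    · rintro (hy | ⟨z, hz, hra⟩)
      · exact Or.inl ((PySem.Set.mem_add seen x y).2 (Or.inl hy))
      · by_cases hzx : z = x
        · rcases (pvRA_split S seen x z y hra).1 hzx with hy' | ⟨w, hwchar, hw⟩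
          · exact Or.inl hy'
          · exact Or.inr ⟨w, List.mem_append.2 (Or.inr ((pv_mem_nbrs S x w).2 hwchar)), hw⟩
        · rcases List.mem_cons.1 hz with rfl | hz'
          · exact absurd rfl hzx
          · rcases (pvRA_split S seen x z y hra).2 hzx with hra' | hy' | ⟨w, hwchar, hw⟩
            · exact Or.inr ⟨z, List.mem_append.2 (Or.inl hz'), hra'⟩
            · exact Or.inl hy'
            · exact Or.inr ⟨w, List.mem_append.2 (Or.inr ((pv_mem_nbrs S x w).2 hwchar)), hw⟩

-- pair arithmetic helpers
theorem pv_add_zero (x : Int × Int) (p : Int × Int) : pvAdd x (pvSmul 0 p) = x := by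
  simp [pvAdd, pvSmul]

theorem pv_sm1 (x p : Int × Int) (k : Int) :
    pvAdd (pvAdd x (pvSmul k p)) p = pvAdd x (pvSmul (k + 1) p) := by
  simp only [pvAdd, pvSmul, Prod.mk.injEq]; constructor <;> ring

theorem pv_sm2 (x p : Int × Int) (k : Int) :
    pvAdd (pvAdd x (pvSmul k p)) (pvNeg p) = pvAdd x (pvSmul (k - 1) p) := by
  simp only [pvAdd, pvSmul, pvNeg, Prod.mk.injEq]; constructor <;> ring

theorem pv_addneg (a d : Int × Int) : pvAdd (pvAdd a (pvNeg d)) d = a := by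
  simp [pvAdd, pvNeg]

theorem pvStep_symm (S : PySem.Set (Int × Int)) (p a b : Int × Int)
    (h : pvStep S p a b) : pvStep S p b a := by
  obtain ⟨ha, hb, hab⟩ := h
  refine ⟨hb, ha, ?_⟩
  rcases hab with rfl | rfl
  · right
    simp only [pvAdd, pvNeg]
    exact Prod.ext (by simp) (by simp)
  · left
    simp only [pvAdd, pvNeg]
    exact Prod.ext (by simp) (by simp)

theorem pvReach_symm (S : PySem.Set (Int × Int)) (p a b : Int × Int)
    (h : pvReach S p a b) : pvReach S p b a :=
  (Relation.ReflTransGen.symmetric (fun _ _ hs => pvStep_symm S p _ _ hs)) h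

theorem pvReach_chain (S : PySem.Set (Int × Int)) (p x y : Int × Int) (hx : x ∈ S)
    (h : pvReach S p x y) :
    ∃ k : Int, y = pvAdd x (pvSmul k p) ∧
      ∀ j : Int, ((0 ≤ j ∧ j ≤ k) ∨ (k ≤ j ∧ j ≤ 0)) → pvAdd x (pvSmul j p) ∈ S := by
  induction h with
  | refl =>
    exact ⟨0, (pv_add_zero x p).symm, fun j hj => by
      have : j = 0 := by omega
      rw [this, pv_add_zero]; exact hx⟩
  | tail hab hstep ih =>
    obtain ⟨k, rfl, hchain⟩ := ih
    obtain ⟨hbS, hcS, hstep'⟩ := hstep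
    rcases hstep' with rfl | rfl
    · refine ⟨k + 1, by rw [← pv_sm1], fun j hj => ?_⟩
      by_cases hjo : (0 ≤ j ∧ j ≤ k) ∨ (k ≤ j ∧ j ≤ 0)
      · exact hchain j hjo
      · have : j = k + 1 := by omega
        rw [this, ← pv_sm1]; exact hcS
    · refine ⟨k - 1, by rw [← pv_sm2], fun j hj => ?_⟩
      by_cases hjo : (0 ≤ j ∧ j ≤ k) ∨ (k ≤ j ∧ j ≤ 0)
      · exact hchain j hjo
      · have : j = k - 1 := by omega
        rw [this, ← pv_sm2]; exact hcS

theorem pv_smul_inj (p : Int × Int) (hp : p ≠ (0, 0)) (x : Int × Int) (j j' : Int)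
    (h : pvAdd x (pvSmul j p) = pvAdd x (pvSmul j' p)) : j = j' := by
  simp only [pvAdd, pvSmul, Prod.mk.injEq, add_right_inj] at h
  have hp' : p.1 ≠ 0 ∨ p.2 ≠ 0 := by
    by_contra hc; push_neg at hc
    exact hp (by cases p; simp_all)
  rcases hp' with h1 | h1
  · exact mul_right_cancel₀ h1 h.1
  · exact mul_right_cancel₀ h1 h.2

theorem pv_exists_end (S : PySem.Set (Int × Int)) (p : Int × Int) (hp : p ≠ (0, 0))
    (x : Int × Int) (hx : x ∈ S) :
    ∃ e, pvReach S p x e ∧ pvAdd e p ∉ S := by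
  by_contra hc
  push_neg at hc
  have hall : ∀ n : Nat, pvAdd x (pvSmul (n : Int) p) ∈ S ∧
      pvReach S p x (pvAdd x (pvSmul (n : Int) p)) := by
    intro n
    induction n with
    | zero =>
      push_cast
      rw [pv_add_zero]
      exact ⟨hx, .refl⟩
    | succ m ih =>
      have hmem : pvAdd x (pvSmul ((m : Int) + 1) p) ∈ S := by
        have := hc _ ih.2
        rwa [pv_sm1] at this
      have hreach : pvReach S p x (pvAdd x (pvSmul ((m : Int) + 1) p)) :=
        ih.2.tail ⟨ih.1, hmem, Or.inl (pv_sm1 x p m).symm⟩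
      push_cast
      exact ⟨hmem, hreach⟩
  have hnd : ((List.range (S.length + 1)).map (fun n : Nat => pvAdd x (pvSmul (n : Int) p))).Nodup := by
    refine List.Nodup.map ?_ List.nodup_range
    intro n m hnm
    exact_mod_cast pv_smul_inj p hp x n m hnm
  have hsub : ∀ y ∈ (List.range (S.length + 1)).map (fun n : Nat => pvAdd x (pvSmul (n : Int) p)), y ∈ S := by
    intro y hy
    rcases List.mem_map.1 hy with ⟨n, _, rfl⟩
    exact (hall n).1
  have h1 := List.toFinset_card_of_nodup hnd
  have h2 : ((List.range (S.length + 1)).map (fun n : Nat => pvAdd x (pvSmul (n : Int) p))).toFinset ⊆ S.toFinset := by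
    intro a ha; rw [List.mem_toFinset] at ha ⊢; exact hsub a ha
  have h3 := Finset.card_le_card h2
  have h4 : S.toFinset.card ≤ S.length := S.toFinset_card_le
  have h5 : ((List.range (S.length + 1)).map (fun n : Nat => pvAdd x (pvSmul (n : Int) p))).length = S.length + 1 := by simp
  omega

theorem pv_end_unique (S : PySem.Set (Int × Int)) (p : Int × Int) (hp : p ≠ (0, 0))
    (x e₁ e₂ : Int × Int) (hx : x ∈ S)
    (h1 : pvReach S p x e₁) (h2 : pvReach S p x e₂)
    (he1 : pvAdd e₁ p ∉ S) (he2 : pvAdd e₂ p ∉ S) : e₁ = e₂ := by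
  obtain ⟨k1, rfl, hc1⟩ := pvReach_chain S p x _ hx h1
  obtain ⟨k2, rfl, hc2⟩ := pvReach_chain S p x _ hx h2
  rw [pv_sm1] at he1 he2
  have hk1 : 0 ≤ k1 := by
    by_contra hneg
    exact he1 (hc1 (k1 + 1) (by omega))
  have hk2 : 0 ≤ k2 := by
    by_contra hneg
    exact he2 (hc2 (k2 + 1) (by omega))
  have : k1 = k2 := by
    by_contra hne
    rcases lt_or_gt_of_ne hne with hlt | hlt
    · exact he1 (hc2 (k1 + 1) (by omega))
    · exact he2 (hc1 (k2 + 1) (by omega))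
  rw [this]

-- BFS reachability coincides with ±p reachability when no two S-cells are d-adjacent
theorem pvRA_eq_reach (S seen : PySem.Set (Int × Int)) (d p : Int × Int)
    (hd : ∀ a ∈ S, pvAdd a d ∉ S)
    (hdirs : ∀ e ∈ pvDirs, e = d ∨ e = pvNeg d ∨ e = p ∨ e = pvNeg p)
    (hpd : p ∈ pvDirs) (hpnd : pvNeg p ∈ pvDirs)
    (hclosed : ∀ a b, a ∈ seen → pvStep S p a b → b ∈ seen)
    (x y : Int × Int) (hx : x ∉ seen) :
    pvRA S seen x y ↔ pvReach S p x y := by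
  constructor
  · intro h
    refine Relation.ReflTransGen.mono ?_ h
    rintro a b ⟨_, haS, hbS, d', hd', rfl⟩
    rcases hdirs d' hd' with rfl | rfl | rfl | rfl
    · exact absurd hbS (hd a haS)
    · exfalso; apply hd _ hbS; rw [pv_addneg]; exact haS
    · exact ⟨haS, hbS, Or.inl rfl⟩
    · exact ⟨haS, hbS, Or.inr rfl⟩
  · intro h
    have H : ∀ z, pvReach S p z y → z ∉ seen → pvRA S seen z y := by
      intro z hzy
      induction hzy using Relation.ReflTransGen.head_induction_on with
      | refl => intro _; exact Relation.ReflTransGen.refl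
      | head hstep htail ih =>
        intro hz
        have hc : _ ∉ seen := fun hcs => hz (hclosed _ _ hcs (pvStep_symm S p _ _ hstep))
        refine Relation.ReflTransGen.head ⟨hz, hstep.1, hstep.2.1, ?_⟩ (ih hc)
        rcases hstep.2.2 with rfl | rfl
        · exact ⟨p, hpd, rfl⟩
        · exact ⟨pvNeg p, hpnd, rfl⟩
    exact H x h hx

theorem pv_filter_succ {α : Type} (l : List α) (hl : l.Nodup)
    (q₁ q₂ : α → Bool) (a : α) (ha : a ∈ l) (hq1 : q₁ a = false) (hq2 : q₂ a = true)
    (hiff : ∀ b ∈ l, (q₂ b = true ↔ (q₁ b = true ∨ b = a))) :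
    (l.filter q₂).length = (l.filter q₁).length + 1 := by
  induction l with
  | nil => cases ha
  | cons b t ih =>
    have hbt := List.nodup_cons.1 hl
    rcases List.mem_cons.1 ha with hab | hat
    · have hq2b : q₂ b = true := hab ▸ hq2
      have hq1b : q₁ b = false := hab ▸ hq1
      have heq : t.filter q₂ = t.filter q₁ := by
        apply List.filter_congr
        intro c hc
        have hca : c ≠ a := by
          intro h
          apply hbt.1
          rw [← hab, ← h]
          exact hc
        have h2 := hiff c (List.mem_cons_of_mem _ hc)
        cases hq1c : q₁ c <;> cases hq2c : q₂ c <;> simp_all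
      simp [List.filter_cons, hq2b, hq1b, heq]
    · by_cases hba : b = a
      · exact absurd hat (hba ▸ hbt.1)
      · have hbq : q₂ b = q₁ b := by
          have h2 := hiff b List.mem_cons_self
          cases hq1b : q₁ b <;> cases hq2b : q₂ b <;> simp_all
        have hrec := ih hbt.2 hat (fun c hc => hiff c (List.mem_cons_of_mem _ hc))
        cases hqb : q₁ b <;>
          simp [List.filter_cons, hbq, hqb, hrec]

theorem pv_inner_go (S : PySem.Set (Int × Int)) (d p : Int × Int)
    (hS : S.Nodup) (hd : ∀ a ∈ S, pvAdd a d ∉ S)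
    (hdirs : ∀ e ∈ pvDirs, e = d ∨ e = pvNeg d ∨ e = p ∨ e = pvNeg p)
    (hp : p ≠ (0, 0)) (hpd : p ∈ pvDirs) (hpnd : pvNeg p ∈ pvDirs) (acc₀ : Int) :
    ∀ (L : List {x // x ∈ S}) (acc : Int) (seen : PySem.Set (Int × Int)) (pre : List (Int × Int)),
    (∀ y, y ∈ seen ↔ ∃ x ∈ pre, pvReach S p x y) →
    (acc = acc₀ + ((S.filter (fun e => decide (e ∈ seen) && decide (pvAdd e p ∉ S))).length : Int)) →
    (L.foldl (fun (st : Int × PySem.Set (Int × Int)) x =>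
        if x.1 ∈ st.2 then st
        else (st.1 + 1, pvBFS S [x.1] st.2 (fun y hy => (List.mem_singleton.1 hy) ▸ x.2)))
      (acc, seen)).1 =
      acc₀ + ((S.filter (fun e =>
        decide (e ∈ (L.foldl (fun (st : Int × PySem.Set (Int × Int)) x =>
          if x.1 ∈ st.2 then st
          else (st.1 + 1, pvBFS S [x.1] st.2 (fun y hy => (List.mem_singleton.1 hy) ▸ x.2)))
          (acc, seen)).2) && decide (pvAdd e p ∉ S))).length : Int) ∧
    (∀ y, y ∈ (L.foldl (fun (st : Int × PySem.Set (Int × Int)) x =>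
        if x.1 ∈ st.2 then st
        else (st.1 + 1, pvBFS S [x.1] st.2 (fun y hy => (List.mem_singleton.1 hy) ▸ x.2)))
      (acc, seen)).2 ↔ ∃ x, (x ∈ pre ∨ x ∈ L.map Subtype.val) ∧ pvReach S p x y) := by
  intro L
  induction L with
  | nil =>
    intro acc seen pre hseen hacc
    simp only [List.foldl_nil]
    refine ⟨hacc, fun y => ?_⟩
    rw [hseen y]
    simp
  | cons xh L ih =>
    intro acc seen pre hseen hacc
    obtain ⟨x, hxS⟩ := xh
    by_cases hxseen : x ∈ seen
    · rw [List.foldl_cons, if_pos hxseen]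
      have hseen' : ∀ y, y ∈ seen ↔ ∃ x' ∈ pre ++ [x], pvReach S p x' y := by
        intro y
        rw [hseen y]
        constructor
        · rintro ⟨x₀, h₀, hr⟩
          exact ⟨x₀, List.mem_append.2 (Or.inl h₀), hr⟩
        · rintro ⟨x₀, h₀, hr⟩
          rcases List.mem_append.1 h₀ with h₀ | h₀
          · exact ⟨x₀, h₀, hr⟩
          · rw [List.mem_singleton.1 h₀] at hr
            obtain ⟨x₁, hx₁, hr₁⟩ := (hseen x).1 hxseen
            exact ⟨x₁, hx₁, hr₁.trans hr⟩
      obtain ⟨h1, h2⟩ := ih acc seen (pre ++ [x]) hseen' hacc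
      refine ⟨h1, fun y => ?_⟩
      rw [h2 y]
      constructor
      · rintro ⟨x', hx', hr⟩
        simp only [List.mem_append, List.mem_singleton] at hx'
        refine ⟨x', ?_, hr⟩
        simp only [List.map_cons, List.mem_cons]
        tauto
      · rintro ⟨x', hx', hr⟩
        simp only [List.map_cons, List.mem_cons] at hx'
        refine ⟨x', ?_, hr⟩
        simp only [List.mem_append, List.mem_singleton]
        tauto
    · rw [List.foldl_cons, if_neg hxseen]
      have hclosed : ∀ a b, a ∈ seen → pvStep S p a b → b ∈ seen := by
        intro a b ha hstep
        obtain ⟨x₀, hx₀, hr⟩ := (hseen a).1 ha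
        exact (hseen b).2 ⟨x₀, hx₀, hr.tail hstep⟩
      have hseen2 : ∀ y,
          y ∈ pvBFS S [x] seen (fun y hy => (List.mem_singleton.1 hy) ▸ hxS) ↔
          y ∈ seen ∨ pvReach S p x y := by
        intro y
        rw [pvBFS_mem]
        constructor
        · rintro (hy | ⟨z, hz, hra⟩)
          · exact Or.inl hy
          · rw [List.mem_singleton.1 hz] at hra
            exact Or.inr ((pvRA_eq_reach S seen d p hd hdirs hpd hpnd hclosed x y hxseen).1 hra)
        · rintro (hy | hr)
          · exact Or.inl hy
          · exact Or.inr ⟨x, List.mem_singleton.2 rfl,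
              (pvRA_eq_reach S seen d p hd hdirs hpd hpnd hclosed x y hxseen).2 hr⟩
      obtain ⟨e, hre, hend⟩ := pv_exists_end S p hp x hxS
      have heS : e ∈ S := by
        rcases Relation.ReflTransGen.cases_tail hre with rfl | ⟨c, _, hstep⟩
        · exact hxS
        · exact hstep.2.1
      have henotseen : e ∉ seen := by
        intro hcontra
        obtain ⟨x₀, hx₀, hr₀⟩ := (hseen e).1 hcontra
        have : x ∈ seen := (hseen x).2 ⟨x₀, hx₀, hr₀.trans (pvReach_symm S p x e hre)⟩
        exact hxseen this
      have hacc2 : acc + 1 = acc₀ + ((S.filter (fun e' =>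
          decide (e' ∈ pvBFS S [x] seen (fun y hy => (List.mem_singleton.1 hy) ▸ hxS)) &&
          decide (pvAdd e' p ∉ S))).length : Int) := by
        have hcnt := pv_filter_succ S hS
          (fun e' => decide (e' ∈ seen) && decide (pvAdd e' p ∉ S))
          (fun e' => decide (e' ∈ pvBFS S [x] seen (fun y hy => (List.mem_singleton.1 hy) ▸ hxS)) &&
            decide (pvAdd e' p ∉ S))
          e heS
          (by simp [henotseen])
          (by simp [hend, (hseen2 e).2 (Or.inr hre)])
          (by
            intro b hbS
            simp only [Bool.and_eq_true, decide_eq_true_eq]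
            constructor
            · rintro ⟨hb2, hbend⟩
              rcases (hseen2 b).1 hb2 with hbseen | hbr
              · exact Or.inl ⟨hbseen, hbend⟩
              · exact Or.inr (pv_end_unique S p hp x b e hxS hbr hre hbend hend)
            · rintro (⟨hbseen, hbend⟩ | rfl)
              · exact ⟨(hseen2 b).2 (Or.inl hbseen), hbend⟩
              · exact ⟨(hseen2 b).2 (Or.inr hre), hend⟩)
        rw [hacc, hcnt]
        push_cast
        ring
      have hseen2' : ∀ y,
          y ∈ pvBFS S [x] seen (fun y hy => (List.mem_singleton.1 hy) ▸ hxS) ↔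
          ∃ x' ∈ pre ++ [x], pvReach S p x' y := by
        intro y
        rw [hseen2 y]
        constructor
        · rintro (hy | hr)
          · obtain ⟨x₀, hx₀, hr₀⟩ := (hseen y).1 hy
            exact ⟨x₀, List.mem_append.2 (Or.inl hx₀), hr₀⟩
          · exact ⟨x, List.mem_append.2 (Or.inr (List.mem_singleton.2 rfl)), hr⟩
        · rintro ⟨x₀, hx₀, hr₀⟩
          rcases List.mem_append.1 hx₀ with h₀ | h₀
          · exact Or.inl ((hseen y).2 ⟨x₀, h₀, hr₀⟩)
          · rw [List.mem_singleton.1 h₀] at hr₀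
            exact Or.inr hr₀
      obtain ⟨h1, h2⟩ := ih (acc + 1)
        (pvBFS S [x] seen (fun y hy => (List.mem_singleton.1 hy) ▸ hxS))
        (pre ++ [x]) hseen2' hacc2
      refine ⟨h1, fun y => ?_⟩
      rw [h2 y]
      constructor
      · rintro ⟨x', hx', hr⟩
        simp only [List.mem_append, List.mem_singleton] at hx'
        refine ⟨x', ?_, hr⟩
        simp only [List.map_cons, List.mem_cons]
        tauto
      · rintro ⟨x', hx', hr⟩
        simp only [List.map_cons, List.mem_cons] at hx'
        refine ⟨x', ?_, hr⟩
        simp only [List.mem_append, List.mem_singleton]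
        tauto

-- the inner loop counts one per component = one per p-end of S
theorem pvInner_eq (S : PySem.Set (Int × Int)) (d p : Int × Int)
    (hS : S.Nodup) (hd : ∀ a ∈ S, pvAdd a d ∉ S)
    (hdirs : ∀ e ∈ pvDirs, e = d ∨ e = pvNeg d ∨ e = p ∨ e = pvNeg p)
    (hp : p ≠ (0, 0)) (hpd : p ∈ pvDirs) (hpnd : pvNeg p ∈ pvDirs) (acc : Int) :
    pvInner S acc = acc + ((S.filter (fun e => decide (pvAdd e p ∉ S))).length : Int) := by
  obtain ⟨h1, h2⟩ := pv_inner_go S d p hS hd hdirs hp hpd hpnd acc S.attach acc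
    PySem.Set.empty []
    (by intro y; simp [PySem.Set.empty])
    (by simp [PySem.Set.empty])
  have hfe : (S.filter (fun e =>
      decide (e ∈ (S.attach.foldl (fun (st : Int × PySem.Set (Int × Int)) x =>
        if x.1 ∈ st.2 then st
        else (st.1 + 1, pvBFS S [x.1] st.2 (fun y hy => (List.mem_singleton.1 hy) ▸ x.2)))
        (acc, PySem.Set.empty)).2) && decide (pvAdd e p ∉ S))) =
      S.filter (fun e => decide (pvAdd e p ∉ S)) := by
    apply List.filter_congr
    intro e heS
    have hmem : e ∈ (S.attach.foldl (fun (st : Int × PySem.Set (Int × Int)) x =>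
        if x.1 ∈ st.2 then st
        else (st.1 + 1, pvBFS S [x.1] st.2 (fun y hy => (List.mem_singleton.1 hy) ▸ x.2)))
        (acc, PySem.Set.empty)).2 := by
      rw [h2 e]
      refine ⟨e, Or.inr ?_, Relation.ReflTransGen.refl⟩
      rw [List.attach_map_subtype_val]
      exact heS
    rw [decide_eq_true hmem, Bool.true_and]
  unfold pvInner
  rw [h1, hfe]

-- ===== phase 1: the dictionary built by A =====

theorem pv_upd_getD (points : List (Int × Int)) (cell : Int × Int)
    (st : Int × PySem.Dict (Int × Int) (PySem.Set (Int × Int))) (d k : Int × Int) :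
    ((pvUpd points cell st d).2).getD k PySem.Set.empty =
      if k = d ∧ (cell.1 + d.1, cell.2 + d.2) ∉ points
      then PySem.Set.add (st.2.getD d PySem.Set.empty) cell
      else st.2.getD k PySem.Set.empty := by
  unfold pvUpd
  by_cases hmem : (cell.1 + d.1, cell.2 + d.2) ∈ points
  · simp [hmem]
  · simp only [if_neg hmem]
    have hdict : ∀ k', (if st.2.contains d then st.2 else st.2.insert d PySem.Set.empty).getD k'
        PySem.Set.empty = st.2.getD k' PySem.Set.empty := by
      intro k'
      by_cases hc : st.2.contains d
      · rw [if_pos hc]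
      · rw [if_neg hc, PySem.Dict.getD_insert]
        by_cases hkd' : k' = d
        · rw [if_pos hkd', hkd',
            PySem.Dict.getD_of_not_contains st.2 PySem.Set.empty (by simpa using hc)]
        · rw [if_neg hkd']
    rw [PySem.Dict.getD_modify, hdict d, hdict k]
    by_cases hkd : k = d
    · rw [if_pos hkd,
        if_pos (show k = d ∧ (cell.1 + d.1, cell.2 + d.2) ∉ points from ⟨hkd, hmem⟩)]
    · rw [if_neg hkd,
        if_neg (show ¬(k = d ∧ (cell.1 + d.1, cell.2 + d.2) ∉ points) from fun h => hkd h.1)]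

theorem pv_cell_fold_getD (points : List (Int × Int)) (cell : Int × Int) :
    ∀ (D : List (Int × Int)), D.Nodup →
      ∀ (st : Int × PySem.Dict (Int × Int) (PySem.Set (Int × Int))) (k : Int × Int),
    ((D.foldl (pvUpd points cell) st).2).getD k PySem.Set.empty =
      if k ∈ D ∧ (cell.1 + k.1, cell.2 + k.2) ∉ points
      then PySem.Set.add (st.2.getD k PySem.Set.empty) cell
      else st.2.getD k PySem.Set.empty := by
  intro D
  induction D with
  | nil =>
    intro _ st k
    simp
  | cons d0 D' ih =>
    intro hnd st k
    obtain ⟨hd0, hnd'⟩ := List.nodup_cons.1 hnd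
    rw [List.foldl_cons, ih hnd' (pvUpd points cell st d0) k]
    by_cases hkd0 : k = d0
    · subst hkd0
      have hkD' : k ∉ D' := hd0
      have hupd := pv_upd_getD points cell st k k
      by_cases hc : (cell.1 + k.1, cell.2 + k.2) ∈ points
      · rw [if_neg (show ¬(k ∈ D' ∧ (cell.1 + k.1, cell.2 + k.2) ∉ points) from fun h => h.2 hc),
          hupd,
          if_neg (show ¬(k = k ∧ (cell.1 + k.1, cell.2 + k.2) ∉ points) from fun h => h.2 hc),
          if_neg (show ¬(k ∈ k :: D' ∧ (cell.1 + k.1, cell.2 + k.2) ∉ points) from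
            fun h => h.2 hc)]
      · rw [if_neg (show ¬(k ∈ D' ∧ (cell.1 + k.1, cell.2 + k.2) ∉ points) from
            fun h => hkD' h.1),
          hupd,
          if_pos (show k = k ∧ (cell.1 + k.1, cell.2 + k.2) ∉ points from ⟨rfl, hc⟩),
          if_pos (show k ∈ k :: D' ∧ (cell.1 + k.1, cell.2 + k.2) ∉ points from
            ⟨List.mem_cons_self, hc⟩)]
    · have h1 : ((pvUpd points cell st d0).2).getD k PySem.Set.empty =
          st.2.getD k PySem.Set.empty := by
        rw [pv_upd_getD, if_neg (fun h => hkd0 h.1)]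
      simp only [h1, List.mem_cons, hkd0, false_or]

theorem pv_cell_fold_keys (points : List (Int × Int)) (cell : Int × Int) :
    ∀ (D : List (Int × Int))
      (st : Int × PySem.Dict (Int × Int) (PySem.Set (Int × Int))),
    (st.2.keys.Nodup → ((D.foldl (pvUpd points cell) st).2).keys.Nodup) ∧
    (∀ k, k ∈ ((D.foldl (pvUpd points cell) st).2).keys → k ∈ st.2.keys ∨ k ∈ D) := by
  have hupd_nodup : ∀ (st : Int × PySem.Dict (Int × Int) (PySem.Set (Int × Int))) (d : Int × Int),
      st.2.keys.Nodup → ((pvUpd points cell st d).2).keys.Nodup := by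
    intro st d hnd
    unfold pvUpd
    by_cases hmem : (cell.1 + d.1, cell.2 + d.2) ∈ points
    · rw [if_pos hmem]; exact hnd
    · rw [if_neg hmem]
      simp only []
      rw [PySem.Dict.keys_modify]
      by_cases hc : st.2.contains d
      · rw [if_pos hc]
        exact PySem.Dict.nodup_keys_insert _ _ _ hnd
      · rw [if_neg hc]
        exact PySem.Dict.nodup_keys_insert _ _ _ (PySem.Dict.nodup_keys_insert _ _ _ hnd)
  have hupd_sub : ∀ (st : Int × PySem.Dict (Int × Int) (PySem.Set (Int × Int))) (d k : Int × Int),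
      k ∈ ((pvUpd points cell st d).2).keys → k ∈ st.2.keys ∨ k = d := by
    intro st d k hk
    unfold pvUpd at hk
    by_cases hmem : (cell.1 + d.1, cell.2 + d.2) ∈ points
    · rw [if_pos hmem] at hk; exact Or.inl hk
    · rw [if_neg hmem] at hk
      simp only [] at hk
      rw [PySem.Dict.keys_modify] at hk
      rcases (PySem.Dict.mem_keys_insert _ _ _ _).1 hk with rfl | hk' 
      · exact Or.inr rfl
      · by_cases hc : st.2.contains d
        · rw [if_pos hc] at hk'; exact Or.inl hk'
        · rw [if_neg hc] at hk'
          rcases (PySem.Dict.mem_keys_insert _ _ _ _).1 hk' with rfl | hk'' 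
          · exact Or.inr rfl
          · exact Or.inl hk''
  intro D
  induction D with
  | nil =>
    intro st
    exact ⟨fun h => h, fun k hk => Or.inl hk⟩
  | cons d0 D' ih =>
    intro st
    rw [List.foldl_cons]
    refine ⟨fun hnd => (ih (pvUpd points cell st d0)).1 (hupd_nodup st d0 hnd), ?_⟩
    intro k hk
    rcases (ih (pvUpd points cell st d0)).2 k hk with hk' | hk'
    · rcases hupd_sub st d0 k hk' with h | rfl
      · exact Or.inl h
      · exact Or.inr List.mem_cons_self
    · exact Or.inr (List.mem_cons_of_mem _ hk')

-- the dictionary after phase 1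
theorem pv_phase1_go (points : List (Int × Int)) :
    ∀ (l : List (Int × Int))
      (st : Int × PySem.Dict (Int × Int) (PySem.Set (Int × Int))) (pre : List (Int × Int)),
    st.2.keys.Nodup →
    (∀ k ∈ st.2.keys, k ∈ pvDirs) →
    (∀ (k y : Int × Int), y ∈ st.2.getD k PySem.Set.empty ↔
      (y ∈ pre ∧ k ∈ pvDirs ∧ (y.1 + k.1, y.2 + k.2) ∉ points)) →
    (∀ k : Int × Int, (st.2.getD k PySem.Set.empty).Nodup) →
    (((l.foldl (fun st cell => pvDirs.foldl (pvUpd points cell) (st.1 + 4, st.2)) st).2).keys.Nodup ∧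
     (∀ k ∈ ((l.foldl (fun st cell => pvDirs.foldl (pvUpd points cell) (st.1 + 4, st.2)) st).2).keys,
        k ∈ pvDirs) ∧
     (∀ (k y : Int × Int),
        y ∈ ((l.foldl (fun st cell => pvDirs.foldl (pvUpd points cell) (st.1 + 4, st.2)) st).2).getD
          k PySem.Set.empty ↔
        (y ∈ pre ++ l ∧ k ∈ pvDirs ∧ (y.1 + k.1, y.2 + k.2) ∉ points)) ∧
     (∀ k : Int × Int,
        (((l.foldl (fun st cell => pvDirs.foldl (pvUpd points cell) (st.1 + 4, st.2)) st).2).getD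
          k PySem.Set.empty).Nodup)) := by
  intro l
  induction l with
  | nil =>
    intro st pre h1 h2 h3 h4
    simp only [List.foldl_nil, List.append_nil]
    exact ⟨h1, h2, h3, h4⟩
  | cons cell l' ih =>
    intro st pre h1 h2 h3 h4
    rw [List.foldl_cons]
    have hgd := pv_cell_fold_getD points cell pvDirs (by decide) (st.1 + 4, st.2)
    have hks := pv_cell_fold_keys points cell pvDirs (st.1 + 4, st.2)
    have hres := ih (pvDirs.foldl (pvUpd points cell) (st.1 + 4, st.2)) (pre ++ [cell])
      (hks.1 h1)
      (fun k hk => by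
        rcases hks.2 k hk with h | h
        · exact h2 k h
        · exact h)
      (fun k y => by
        rw [hgd k]
        by_cases hcnd : k ∈ pvDirs ∧ (cell.1 + k.1, cell.2 + k.2) ∉ points
        · rw [if_pos hcnd, PySem.Set.mem_add]
          constructor
          · rintro (hy | rfl)
            · obtain ⟨hy1, hy2, hy3⟩ := (h3 k y).1 hy
              exact ⟨List.mem_append.2 (Or.inl hy1), hy2, hy3⟩
            · exact ⟨List.mem_append.2 (Or.inr (List.mem_singleton.2 rfl)), hcnd.1, hcnd.2⟩
          · rintro ⟨hy1, hy2, hy3⟩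
            rcases List.mem_append.1 hy1 with h | h
            · exact Or.inl ((h3 k y).2 ⟨h, hy2, hy3⟩)
            · exact Or.inr (List.mem_singleton.1 h)
        · rw [if_neg hcnd, h3 k y]
          constructor
          · rintro ⟨hy1, hy2, hy3⟩
            exact ⟨List.mem_append.2 (Or.inl hy1), hy2, hy3⟩
          · rintro ⟨hy1, hy2, hy3⟩
            rcases List.mem_append.1 hy1 with h | h
            · exact ⟨h, hy2, hy3⟩
            · rw [List.mem_singleton.1 h] at hy3 ⊢
              exact absurd ⟨hy2, hy3⟩ hcnd)
      (fun k => by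
        rw [hgd k]
        by_cases hcnd : k ∈ pvDirs ∧ (cell.1 + k.1, cell.2 + k.2) ∉ points
        · rw [if_pos hcnd]
          exact PySem.Set.nodup_add _ _ (h4 k)
        · rw [if_neg hcnd]
          exact h4 k)
    refine ⟨hres.1, hres.2.1, fun k y => ?_, hres.2.2.2⟩
    rw [hres.2.2.1 k y]
    simp [List.append_assoc]

theorem pv_phase1_dict (points : List (Int × Int)) :
    let Dct := (points.foldl
      (fun st cell => pvDirs.foldl (pvUpd points cell) (st.1 + 4, st.2))
      ((0 : Int), PySem.Dict.empty)).2
    Dct.keys.Nodup ∧ (∀ k ∈ Dct.keys, k ∈ pvDirs) ∧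
    (∀ k : Int × Int, ∀ y, y ∈ Dct.getD k PySem.Set.empty ↔
      (y ∈ points ∧ k ∈ pvDirs ∧ (y.1 + k.1, y.2 + k.2) ∉ points)) ∧
    (∀ k : Int × Int, (Dct.getD k PySem.Set.empty).Nodup) := by
  intro Dct
  have h := pv_phase1_go points points ((0 : Int), PySem.Dict.empty) []
    PySem.Dict.nodup_keys_empty
    (fun k hk => by rw [PySem.Dict.keys_empty] at hk; cases hk)
    (fun k y => by simp [PySem.Dict.getD_empty])
    (fun k => by simp [PySem.Dict.getD_empty])
  simpa using h

-- phase-1 perimeter counter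
theorem pv_dirs_fold_fst (points : List (Int × Int)) (cell : Int × Int) :
    ∀ (D : List (Int × Int)) (st : Int × PySem.Dict (Int × Int) (PySem.Set (Int × Int))),
    (D.foldl (pvUpd points cell) st).1 =
      st.1 - (D.countP (fun dd => decide ((cell.1 + dd.1, cell.2 + dd.2) ∈ points)) : Int) := by
  intro D
  induction D with
  | nil => intro st; simp
  | cons dd D' ih =>
    intro st
    rw [List.foldl_cons, ih]
    have hfst : (pvUpd points cell st dd).1 =
        st.1 - (if (cell.1 + dd.1, cell.2 + dd.2) ∈ points then (1 : Int) else 0) := by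
      unfold pvUpd
      by_cases h : (cell.1 + dd.1, cell.2 + dd.2) ∈ points
      · rw [if_pos h, if_pos h]
      · rw [if_neg h, if_neg h]; ring
    rw [hfst, List.countP_cons]
    by_cases h : (cell.1 + dd.1, cell.2 + dd.2) ∈ points
    · simp [h]
      all_goals (push_cast; ring)
    · simp [h]
      all_goals (push_cast; ring)

theorem pv_points_fold_fst (points : List (Int × Int)) :
    ∀ (l : List (Int × Int)) (st : Int × PySem.Dict (Int × Int) (PySem.Set (Int × Int))),
    (l.foldl (fun st cell => pvDirs.foldl (pvUpd points cell) (st.1 + 4, st.2)) st).1 =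
      st.1 + (l.map (fun cell => 4 -
        ((pvDirs.countP (fun dd => decide ((cell.1 + dd.1, cell.2 + dd.2) ∈ points))) : Int))).sum := by
  intro l
  induction l with
  | nil => intro st; simp
  | cons cell l' ih =>
    intro st
    rw [List.foldl_cons, ih, pv_dirs_fold_fst points cell pvDirs (st.1 + 4, st.2)]
    simp only [List.map_cons, List.sum_cons]
    ring

theorem pv_phase1_fst (points : List (Int × Int)) :
    (points.foldl
      (fun st cell => pvDirs.foldl (pvUpd points cell) (st.1 + 4, st.2))
      ((0 : Int), PySem.Dict.empty)).1 =
    4 * points.length -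
      (points.map (fun cell =>
        ((pvDirs.countP (fun d => decide ((cell.1 + d.1, cell.2 + d.2) ∈ points))) : Int))).sum := by
  rw [pv_points_fold_fst points points ((0 : Int), PySem.Dict.empty)]
  have : ∀ (l : List (Int × Int)) (g : (Int × Int) → Int),
      (l.map (fun c => 4 - g c)).sum = 4 * l.length - (l.map g).sum := by
    intro l g
    induction l with
    | nil => simp
    | cons c t ih => simp [ih]; push_cast; ring
  rw [this]
  ring

-- ===== assembling the two sides =====

theorem pv_foldl_ite_count {α : Type} (P : α → Prop) [DecidablePred P] :
    ∀ (D : List α) (a : Int),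
    D.foldl (fun acc x => if P x then acc + 1 else acc) a =
      a + (D.countP (fun x => decide (P x)) : Int) := by
  intro D
  induction D with
  | nil => intro a; simp
  | cons x D' ih =>
    intro a
    rw [List.foldl_cons, List.countP_cons]
    by_cases h : P x
    · rw [if_pos h, ih]
      simp [h]
      push_cast
      ring
    · rw [if_neg h, ih]
      simp [h]

theorem pv_len_filter_eq {α : Type} [DecidableEq α] (l₁ l₂ : List α) (p₁ p₂ : α → Bool)
    (h₁ : l₁.Nodup) (h₂ : l₂.Nodup)
    (h : ∀ y, (y ∈ l₁ ∧ p₁ y = true) ↔ (y ∈ l₂ ∧ p₂ y = true)) :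
    (l₁.filter p₁).length = (l₂.filter p₂).length := by
  apply List.Perm.length_eq
  rw [List.perm_ext_iff_of_nodup (h₁.filter _) (h₂.filter _)]
  intro a
  simp only [List.mem_filter]
  exact h a

theorem pv_double_count {α β : Type} (l : List α) (m : List β) (q : α → β → Bool) :
    (l.map (fun x => ((m.countP (q x)) : Int))).sum =
      (m.map (fun c => ((l.countP (fun x => q x c)) : Int))).sum := by
  induction m with
  | nil => simp
  | cons c m' ih =>
    have h1 : ∀ x : α, ((List.countP (q x) (c :: m') : Int)) =
        (List.countP (q x) m' : Int) + (if q x c = true then (1 : Int) else 0) := by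
      intro x
      rw [List.countP_cons]
      push_cast
      split <;> simp
    rw [List.map_congr_left (fun x _ => h1 x), PySem.List.sum_map_add_int l _ _,
      PySem.List.sum_map_ite_one_zero (fun x => q x c) l, List.map_cons, List.sum_cons, ih]
    ring

theorem pv_keys_fold (F : (Int × Int) → PySem.Set (Int × Int)) :
    ∀ (K : List (Int × Int)),
    (∀ k ∈ K, ∀ acc : Int, pvInner (F k) acc = acc +
      (((F k).filter (fun e => decide (pvAdd e (pvPerp k) ∉ F k))).length : Int)) →
    ∀ acc : Int, K.foldl (fun acc k => pvInner (F k) acc) acc =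
      acc + (K.map (fun k =>
        ((((F k).filter (fun e => decide (pvAdd e (pvPerp k) ∉ F k))).length : Int)))).sum := by
  intro K
  induction K with
  | nil => intro _ acc; simp
  | cons k K' ih =>
    intro hper acc
    rw [List.foldl_cons, hper k List.mem_cons_self acc,
      ih (fun k' hk' => hper k' (List.mem_cons_of_mem _ hk')), List.map_cons, List.sum_cons]
    ring

theorem pv_main (points : List (Int × Int)) :
    calc_perimeter points = calc_perimeter_alt points := by
  obtain ⟨hnd, hsub, hchar, hvnd⟩ := pv_phase1_dict points
  unfold calc_perimeter calc_perimeter_alt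
  simp only [Prod.mk.injEq]
  refine ⟨?_, ?_⟩
  · -- perimeter component
    rw [pv_phase1_fst]
    have hfun : (fun (acc : Int) (rc : Int × Int) =>
        pvDirs.foldl (fun acc d =>
          if (rc.1 + d.1, rc.2 + d.2) ∈ PySem.Set.ofList points then acc + 1 else acc) acc) =
        (fun (acc : Int) (rc : Int × Int) => acc +
          ((pvDirs.countP (fun d =>
            decide ((rc.1 + d.1, rc.2 + d.2) ∈ PySem.Set.ofList points))) : Int)) := by
      funext acc rc
      exact pv_foldl_ite_count _ pvDirs acc
    rw [hfun, PySem.List.foldl_add]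
    have hcnt : ∀ cell ∈ points,
        ((pvDirs.countP (fun d => decide ((cell.1 + d.1, cell.2 + d.2) ∈ points))) : Int) =
        ((pvDirs.countP (fun d =>
          decide ((cell.1 + d.1, cell.2 + d.2) ∈ PySem.Set.ofList points))) : Int) := by
      intro cell _
      congr 1
      apply List.countP_congr
      intro d _
      simp [PySem.Set.mem_ofList]
    rw [List.map_congr_left hcnt]
    ring
  · -- sides component
    rw [PySem.Dict.items_eq_map_keys _ hnd PySem.Set.empty, List.foldl_map]
    have hper : ∀ k ∈ (points.foldl
        (fun st cell => pvDirs.foldl (pvUpd points cell) (st.1 + 4, st.2))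
        ((0 : Int), PySem.Dict.empty)).2.keys, ∀ acc : Int,
        pvInner ((points.foldl
          (fun st cell => pvDirs.foldl (pvUpd points cell) (st.1 + 4, st.2))
          ((0 : Int), PySem.Dict.empty)).2.getD k PySem.Set.empty) acc = acc +
        ((((points.foldl
          (fun st cell => pvDirs.foldl (pvUpd points cell) (st.1 + 4, st.2))
          ((0 : Int), PySem.Dict.empty)).2.getD k PySem.Set.empty).filter
            (fun e => decide (pvAdd e (pvPerp k) ∉ (points.foldl
              (fun st cell => pvDirs.foldl (pvUpd points cell) (st.1 + 4, st.2))
              ((0 : Int), PySem.Dict.empty)).2.getD k PySem.Set.empty))).length : Int) := by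
      intro k hk acc
      have hkdirs : k ∈ pvDirs := hsub k hk
      have hd : ∀ a ∈ (points.foldl
          (fun st cell => pvDirs.foldl (pvUpd points cell) (st.1 + 4, st.2))
          ((0 : Int), PySem.Dict.empty)).2.getD k PySem.Set.empty,
          pvAdd a k ∉ (points.foldl
          (fun st cell => pvDirs.foldl (pvUpd points cell) (st.1 + 4, st.2))
          ((0 : Int), PySem.Dict.empty)).2.getD k PySem.Set.empty := by
        intro a ha hcontra
        obtain ⟨_, _, ha3⟩ := (hchar k a).1 ha
        obtain ⟨hb1, _, _⟩ := (hchar k (pvAdd a k)).1 hcontra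
        exact ha3 hb1
      have hS := hvnd k
      fin_cases hkdirs
      · exact pvInner_eq _ _ _ hS hd (by decide) (by decide) (by decide) (by decide) acc
      · exact pvInner_eq _ _ _ hS hd (by decide) (by decide) (by decide) (by decide) acc
      · exact pvInner_eq _ _ _ hS hd (by decide) (by decide) (by decide) (by decide) acc
      · exact pvInner_eq _ _ _ hS hd (by decide) (by decide) (by decide) (by decide) acc
    rw [pv_keys_fold _ _ hper 0]
    have hstep1 : (((points.foldl
        (fun st cell => pvDirs.foldl (pvUpd points cell) (st.1 + 4, st.2))
        ((0 : Int), PySem.Dict.empty)).2.keys).map (fun k =>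
          ((((points.foldl
            (fun st cell => pvDirs.foldl (pvUpd points cell) (st.1 + 4, st.2))
            ((0 : Int), PySem.Dict.empty)).2.getD k PySem.Set.empty).filter
              (fun e => decide (pvAdd e (pvPerp k) ∉ (points.foldl
                (fun st cell => pvDirs.foldl (pvUpd points cell) (st.1 + 4, st.2))
                ((0 : Int), PySem.Dict.empty)).2.getD k PySem.Set.empty))).length : Int))).sum =
        (pvDirs.map (fun k =>
          ((((points.foldl
            (fun st cell => pvDirs.foldl (pvUpd points cell) (st.1 + 4, st.2))
            ((0 : Int), PySem.Dict.empty)).2.getD k PySem.Set.empty).filter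
              (fun e => decide (pvAdd e (pvPerp k) ∉ (points.foldl
                (fun st cell => pvDirs.foldl (pvUpd points cell) (st.1 + 4, st.2))
                ((0 : Int), PySem.Dict.empty)).2.getD k PySem.Set.empty))).length : Int))).sum := by
      rw [← List.sum_toFinset _ hnd, ← List.sum_toFinset _ (show pvDirs.Nodup by decide)]
      apply Finset.sum_subset
      · intro k hk
        simp only [List.mem_toFinset] at hk ⊢
        exact hsub k hk
      · intro k _ hnk
        simp only [List.mem_toFinset] at hnk
        have hget : (points.foldl
            (fun st cell => pvDirs.foldl (pvUpd points cell) (st.1 + 4, st.2))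
            ((0 : Int), PySem.Dict.empty)).2.getD k PySem.Set.empty = PySem.Set.empty := by
          apply PySem.Dict.getD_of_not_contains
          rw [← Bool.not_eq_true]
          intro hc
          exact hnk ((PySem.Dict.contains_iff_mem_keys _ _).1 hc)
        rw [hget]
        simp [PySem.Set.empty]
    rw [hstep1]
    have hfunB : (fun (acc : Int) (rc : Int × Int) =>
        pvCorners.foldl (fun acc c =>
          if (rc.1 + c.1.1, rc.2 + c.1.2) ∉ PySem.Set.ofList points ∧
              ((rc.1 + c.2.1, rc.2 + c.2.2) ∉ PySem.Set.ofList points ∨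
               (rc.1 + c.1.1 + c.2.1, rc.2 + c.1.2 + c.2.2) ∈ PySem.Set.ofList points)
          then acc + 1 else acc) acc) =
        (fun (acc : Int) (rc : Int × Int) => acc + ((pvCorners.countP (fun c =>
          decide ((rc.1 + c.1.1, rc.2 + c.1.2) ∉ PySem.Set.ofList points ∧
              ((rc.1 + c.2.1, rc.2 + c.2.2) ∉ PySem.Set.ofList points ∨
               (rc.1 + c.1.1 + c.2.1, rc.2 + c.1.2 + c.2.2) ∈ PySem.Set.ofList points)))) : Int)) := by
      funext acc rc
      exact pv_foldl_ite_count _ pvCorners acc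
    rw [hfunB, PySem.List.foldl_add, pv_double_count]
    have hcor : pvCorners = pvDirs.map (fun k => (k, pvPerp k)) := by decide
    rw [hcor, List.map_map]
    congr 1
    refine congrArg (fun l : List Int => l.sum) ?_
    apply List.map_congr_left
    intro k hk
    simp only [Function.comp_apply]
    rw [List.countP_eq_length_filter]
    have hlen : (((points.foldl
        (fun st cell => pvDirs.foldl (pvUpd points cell) (st.1 + 4, st.2))
        ((0 : Int), PySem.Dict.empty)).2.getD k PySem.Set.empty).filter
          (fun e => decide (pvAdd e (pvPerp k) ∉ (points.foldl
            (fun st cell => pvDirs.foldl (pvUpd points cell) (st.1 + 4, st.2))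
            ((0 : Int), PySem.Dict.empty)).2.getD k PySem.Set.empty))).length =
        ((PySem.Set.ofList points).filter (fun x =>
          decide ((x.1 + k.1, x.2 + k.2) ∉ PySem.Set.ofList points ∧
            ((x.1 + (pvPerp k).1, x.2 + (pvPerp k).2) ∉ PySem.Set.ofList points ∨
             (x.1 + k.1 + (pvPerp k).1, x.2 + k.2 + (pvPerp k).2) ∈ PySem.Set.ofList points)))).length := by
      apply pv_len_filter_eq _ _ _ _ (hvnd k) (PySem.Set.nodup_ofList points)
      intro y
      simp only [decide_eq_true_eq, PySem.Set.mem_ofList, hchar]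
      have hsw : ((y.1 + (pvPerp k).1) + k.1, (y.2 + (pvPerp k).2) + k.2) =
          (y.1 + k.1 + (pvPerp k).1, y.2 + k.2 + (pvPerp k).2) := by
        simp only [Prod.mk.injEq]
        constructor <;> ring
      constructor
      · rintro ⟨⟨hy1, _, hy3⟩, hnend⟩
        refine ⟨hy1, hy3, ?_⟩
        by_cases hp1 : (y.1 + (pvPerp k).1, y.2 + (pvPerp k).2) ∈ points
        · right
          by_contra hdiag
          apply hnend
          refine ⟨hp1, hk, ?_⟩
          show ((y.1 + (pvPerp k).1) + k.1, (y.2 + (pvPerp k).2) + k.2) ∉ points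
          rw [hsw]
          exact hdiag
        · exact Or.inl hp1
      · rintro ⟨hy1, hy3, hor⟩
        refine ⟨⟨hy1, hk, hy3⟩, ?_⟩
        rintro ⟨hp1, _, hdiag⟩
        rcases hor with h | h
        · exact h hp1
        · apply hdiag
          show ((y.1 + (pvPerp k).1) + k.1, (y.2 + (pvPerp k).2) + k.2) ∈ points
          rw [hsw]
          exact h
    rw [hlen]

-- ===== VERDICT (by name: the statement is the Claim_ definition above) =====
theorem calc_perimeter_spec : Claim_equal_calc_perimeter := by
  intro points _
  unfold Spec_calc_perimeter
  exact pv_main points
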